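-- pv_equiv track=rewrite | github.com/hwnooy/PS_Practice | 프로그래머스/2/42586. 기능개발/기능개발.py | solution
-- ===== SOURCE A (Python) =====
-- import math
-- from collections import deque
--
-- def solution(progresses, speeds):
--     temp = []
--     answer= []
--     for k in range(len(progresses)):
--         temp.append(math.ceil((100-progresses[k])/speeds[k]))
--     dq = deque(temp)
--
--
--
--     while dq : # 비어있지않는 동안
--         curr = dq.popleft()
--         work=1
--         # 맨앞보다 작으면 다 가져오기 (기준은 완전 그냥 맨앞이 기준임.)
--         while dq and curr >= dq[0]:
--             dq.popleft()
--             work+=1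
--         # while문을 빠져나오면, 즉 맨앞보다 이제 큰 수가 나오면 배포개수 카운트 끝
--         answer.append(work)
--         #curr = dq.popleft()
--
--
--     return answer
-- ===== SOURCE B (Python) =====
-- import math
--
-- def solution(progresses, speeds):
--     answer = []
--     threshold = None
--     for p, s in zip(progresses, speeds):
--         day = math.ceil((100 - p) / s)
--         if answer and day <= threshold:
--             answer[-1] += 1
--         else:
--             answer.append(1)
--             threshold = day
--     return answer
-- ===== Notes on version B (the rewrite author's own statement) =====
-- stated objective: simpler
-- what changed: Replaced the deque with nested pop-while loops by a single for-loop over zip(progresses, speeds) that keeps a running group threshold and increments the last group count in place.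
import Mathlib
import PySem

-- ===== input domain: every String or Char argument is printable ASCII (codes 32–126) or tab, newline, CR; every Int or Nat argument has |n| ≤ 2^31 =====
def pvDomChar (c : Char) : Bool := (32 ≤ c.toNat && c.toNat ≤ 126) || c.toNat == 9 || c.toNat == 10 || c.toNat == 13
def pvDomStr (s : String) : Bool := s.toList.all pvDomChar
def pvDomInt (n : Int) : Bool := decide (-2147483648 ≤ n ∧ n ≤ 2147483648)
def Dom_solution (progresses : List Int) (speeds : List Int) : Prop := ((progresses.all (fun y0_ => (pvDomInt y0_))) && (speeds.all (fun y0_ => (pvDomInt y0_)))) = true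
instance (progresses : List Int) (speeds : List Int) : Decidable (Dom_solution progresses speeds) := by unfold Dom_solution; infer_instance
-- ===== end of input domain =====

-- B replaces A's deque with nested pop-while loops by one for-loop over zip(progresses, speeds)
-- keeping a running group threshold (objective: simpler, same O(n) cost).

-- ===== PORT A =====
-- math.ceil((100-p)/s): Python float division is exact enough on Dom (|values| ≤ 2^31+100 « 2^53)
-- that ceil of the float equals the exact rational ceiling, ported as -((-n) // s).
def pvCeilDiv (n : Int) (s : Int) : Int := -(PySem.Int.floordiv (-n) s)

-- inner 'while dq and curr >= dq[0]: dq.popleft(); work += 1'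
def pvInner (curr : Int) (dq : List Int) (work : Int) : Int × List Int :=
  match dq with
  | [] => (work, [])
  | d :: rest => if curr ≥ d then pvInner curr rest (work + 1) else (work, d :: rest)

-- termination measure for the outer loop (cited by pvOuter's decreasing_by)
theorem pvInner_len (curr : Int) (dq : List Int) (work : Int) :
    (pvInner curr dq work).2.length ≤ dq.length := by
  induction dq generalizing work with
  | nil => simp [pvInner]
  | cons d rest ih =>
    simp only [pvInner]
    split
    · exact Nat.le_succ_of_le (ih _)
    · exact Nat.le_refl _

-- outer 'while dq: curr = dq.popleft(); work = 1; <inner>; answer.append(work)'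
def pvOuter (dq : List Int) (answer : List Int) : List Int :=
  match dq with
  | [] => answer
  | curr :: rest => pvOuter (pvInner curr rest 1).2 (answer ++ [(pvInner curr rest 1).1])
termination_by dq.length
decreasing_by exact Nat.lt_succ_of_le (pvInner_len curr rest 1)

def solution (progresses : List Int) (speeds : List Int) : List Int :=
  let temp := List.foldl
    (fun acc k => acc ++ [pvCeilDiv (100 - PySem.List.pyGetD progresses k 0) (PySem.List.pyGetD speeds k 0)])
    [] (PySem.List.pyRange 0 (PySem.List.len progresses))
  pvOuter temp []

-- ===== PORT B =====
def solution_alt (progresses : List Int) (speeds : List Int) : List Int :=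
  ((progresses.zip speeds).foldl
    (fun st ps =>
      let day := pvCeilDiv (100 - ps.1) ps.2
      if st.1 ≠ [] ∧ day ≤ st.2 then (st.1.dropLast ++ [st.1.getLast! + 1], st.2)
      else (st.1 ++ [1], day))
    ([], 0)).1

-- ===== PRECONDITION & SPEC =====
-- Pre_ excludes exactly where A raises: IndexError when speeds is shorter than progresses,
-- ZeroDivisionError when a used speed is 0.
def Pre_solution (progresses : List Int) (speeds : List Int) : Prop :=
  progresses.length ≤ speeds.length ∧ ∀ s ∈ speeds.take progresses.length, s ≠ 0
instance (progresses : List Int) (speeds : List Int) : Decidable (Pre_solution progresses speeds) := by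
  unfold Pre_solution; infer_instance

def pvWitness_solution : List Int × List Int := ([93, 30, 55], [1, 30, 5])

def Spec_solution (progresses : List Int) (speeds : List Int) (out : List Int) : Prop := out = solution_alt progresses speeds
instance (progresses : List Int) (speeds : List Int) (out : List Int) : Decidable (Spec_solution progresses speeds out) := by unfold Spec_solution; infer_instance

-- ===== CLAIM (what is proved, stated in full; the proofs are below) =====
def Claim_equal_solution : Prop := ∀ (progresses : List Int) (speeds : List Int), Dom_solution progresses speeds → Pre_solution progresses speeds → Spec_solution progresses speeds (solution progresses speeds)

-- ===== LEMMAS AND PROOFS =====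

-- B's fold step, specialized to the already-computed day list
def pvStep (st : List Int × Int) (d : Int) : List Int × Int :=
  if st.1 ≠ [] ∧ d ≤ st.2 then (st.1.dropLast ++ [st.1.getLast! + 1], st.2)
  else (st.1 ++ [1], d)

theorem pvStep_le (ans : List Int) (w t d : Int) (h : d ≤ t) :
    pvStep (ans ++ [w], t) d = (ans ++ [w + 1], t) := by
  simp [pvStep, h]

theorem pvStep_gt (ans : List Int) (w t d : Int) (h : ¬ d ≤ t) :
    pvStep (ans ++ [w], t) d = ((ans ++ [w]) ++ [1], d) := by
  simp [pvStep, h]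

-- indexwise days computation equals the zip-map days computation
theorem pvDays_eq (P S : List Int) (h : P.length ≤ S.length) :
    (List.range P.length).map (fun k => pvCeilDiv (100 - P.getD k 0) (S.getD k 0))
      = (P.zip S).map (fun ps => pvCeilDiv (100 - ps.1) ps.2) := by
  induction P generalizing S with
  | nil => simp
  | cons p P' ih =>
    cases S with
    | nil => simp at h
    | cons s S' =>
      simp only [List.length_cons, List.range_succ_eq_map, List.map_cons, List.map_map,
        List.zip_cons_cons]
      refine congrArg₂ _ rfl ?_
      have := ih S' (by simpa using h)
      simpa using this

-- main loop correspondence: B's fold from a state (ans ++ [w], t) runs A's inner loop with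
-- threshold t, then A's outer loop on the remainder
theorem pvFold_eq_outer (l : List Int) (ans : List Int) (w t : Int) :
    (List.foldl pvStep (ans ++ [w], t) l).1
      = pvOuter (pvInner t l w).2 (ans ++ [(pvInner t l w).1]) := by
  induction l generalizing ans w t with
  | nil => simp [pvInner, pvOuter]
  | cons d rest ih =>
    by_cases h : d ≤ t
    · rw [List.foldl_cons, pvStep_le ans w t d h, ih]
      simp [pvInner, h]
    · rw [List.foldl_cons, pvStep_gt ans w t d h, ih (ans ++ [w]) 1 d]
      have hi : pvInner t (d :: rest) w = (w, d :: rest) := by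
        simp [pvInner]; omega
      rw [hi]
      conv_rhs => rw [pvOuter]

-- ===== VERDICT (by name: the statement is the Claim_ definition above) =====
theorem solution_spec : Claim_equal_solution := by
  intro P S _hDom hPre
  unfold Spec_solution solution solution_alt
  -- A's temp list equals B's day list
  have htemp : List.foldl
      (fun acc k => acc ++ [pvCeilDiv (100 - PySem.List.pyGetD P k 0) (PySem.List.pyGetD S k 0)])
      ([] : List Int) (PySem.List.pyRange 0 (PySem.List.len P))
      = (P.zip S).map (fun ps => pvCeilDiv (100 - ps.1) ps.2) := by
    rw [PySem.List.foldl_append_singleton_eq_map]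
    have hlen : PySem.List.len P = ((P.length : Nat) : Int) := by
      simp [PySem.List.len]
    rw [hlen, PySem.List.pyRange_zero_natCast, List.map_map]
    rw [← pvDays_eq P S hPre.1]
    refine List.map_congr_left ?_
    intro k _
    simp [PySem.List.pyGetD_natCast]
  -- B's fold over zip is the fold of pvStep over the day list
  have hfold : (P.zip S).foldl
      (fun st ps =>
        let day := pvCeilDiv (100 - ps.1) ps.2
        if st.1 ≠ [] ∧ day ≤ st.2 then (st.1.dropLast ++ [st.1.getLast! + 1], st.2)
        else (st.1 ++ [1], day))
      (([] : List Int), (0 : Int))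
      = List.foldl pvStep (([] : List Int), (0 : Int))
          ((P.zip S).map (fun ps => pvCeilDiv (100 - ps.1) ps.2)) := by
    rw [List.foldl_map]
    rfl
  rw [htemp, hfold]
  cases hdays : (P.zip S).map (fun ps => pvCeilDiv (100 - ps.1) ps.2) with
  | nil => simp [pvOuter]
  | cons d rest =>
    have h0 : List.foldl pvStep (([] : List Int), (0 : Int)) (d :: rest)
        = List.foldl pvStep (([] ++ [1] : List Int), d) rest := by
      simp [pvStep]
    rw [pvOuter]
    rw [h0, pvFold_eq_outer rest [] 1 d]
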